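-- pv_equiv track=rewrite | github.com/omarkorety/python-problem-solving | find most freq num.py | repet
-- ===== SOURCE A (Python) =====
-- def repet(lst):
--     counter=0
--     num=lst[0]
--     for i in lst:
--         curr_frequ=lst.count(i)
--         if curr_frequ> counter:
--             counter=curr_frequ
--             num=i
--
--         elif curr_frequ==counter:
--             num=min(num,i)
--
--
--     return num, counter
-- ===== SOURCE B (Python) =====
-- def repet(lst):
--     num = lst[0]                 # same IndexError on empty input as A
--     s = sorted(lst)
--     best_num, best_count = num, 0
--     i, n = 0, len(s)
--     while i < n:
--         j = i + 1
--         while j < n and s[j] == s[i]: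
--             j += 1
--         if j - i > best_count:   # strict '>' keeps the smallest value on ties
--             best_count = j - i
--             best_num = s[i]
--         i = j
--     return best_num, best_count
-- ===== Notes on version B (the rewrite author's own statement) =====
-- stated objective: faster
-- what changed: Replaces the quadratic loop that recounts each element with lst.count by a single sort followed by one linear scan of maximal equal runs, updating the best only on a strictly longer run so the smallest max-frequency value wins as in A.
import Mathlib
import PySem

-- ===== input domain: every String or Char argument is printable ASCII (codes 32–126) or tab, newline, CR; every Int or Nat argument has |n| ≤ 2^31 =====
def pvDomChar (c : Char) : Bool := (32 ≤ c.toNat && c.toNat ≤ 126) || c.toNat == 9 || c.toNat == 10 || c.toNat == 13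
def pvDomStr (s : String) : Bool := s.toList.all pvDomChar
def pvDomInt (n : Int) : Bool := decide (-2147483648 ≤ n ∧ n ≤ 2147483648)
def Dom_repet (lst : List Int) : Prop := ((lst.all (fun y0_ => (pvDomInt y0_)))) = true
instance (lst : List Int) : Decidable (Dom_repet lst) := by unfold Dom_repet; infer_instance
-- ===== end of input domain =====

-- B replaces A's quadratic recount-every-element loop by one sort plus a linear scan of
-- maximal runs; return value only, neither version mutates its argument.

-- ===== PORT A =====
-- body of A's for-loop: state is (counter, num), f is the fixed lst.count function
def stepA (f : Int → Int) (st : Int × Int) (i : Int) : Int × Int :=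
  if f i > st.1 then (f i, i)
  else if f i = st.1 then (st.1, min st.2 i)
  else st

def repet (lst : List Int) : Int × Int :=
  -- num = lst[0]: A raises IndexError on []; Pre_repet excludes it, the default is unused there
  let num0 := lst.headD 0
  let st := lst.foldl (stepA (fun i => (lst.count i : Int))) (0, num0)
  (st.2, st.1)

-- ===== PORT B =====
-- the outer while-loop of Source B: x :: rest starts a maximal run (the inner while = takeWhile)
def runScanB (rem : List Int) (bn bc : Int) : Int × Int :=
  match rem with
  | [] => (bn, bc)
  | x :: rest =>
    if 1 + ((rest.takeWhile (fun y => y == x)).length : Int) > bc then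
      runScanB (rest.dropWhile (fun y => y == x)) x
        (1 + ((rest.takeWhile (fun y => y == x)).length : Int))
    else
      runScanB (rest.dropWhile (fun y => y == x)) bn bc
termination_by rem.length
decreasing_by
  all_goals
    simpa using Nat.lt_succ_of_le (List.length_dropWhile_le (fun y => y == x) rest)

def repet_alt (lst : List Int) : Int × Int :=
  let num0 := lst.headD 0      -- lst[0]: same IndexError on [] as A
  let s := PySem.List.sorted lst (fun x => x) false
  runScanB s num0 0

-- ===== PRECONDITION & SPEC =====
-- Both A and B raise IndexError (lst[0]) on the empty list; Pre_ excludes exactly that.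
def Pre_repet (lst : List Int) : Prop := lst ≠ []
instance (lst : List Int) : Decidable (Pre_repet lst) := by unfold Pre_repet; infer_instance
def pvWitness_repet : List Int := [3, 1, 3, 1, 2]

def Spec_repet (lst : List Int) (out : Int × Int) : Prop := out = repet_alt lst
instance (lst : List Int) (out : Int × Int) : Decidable (Spec_repet lst out) := by unfold Spec_repet; infer_instance

-- ===== CLAIM (what is proved, stated in full; the proofs are below) =====
def Claim_equal_repet : Prop := ∀ (lst : List Int), Dom_repet lst → Pre_repet lst → Spec_repet lst (repet lst)

-- ===== LEMMAS AND PROOFS =====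

-- (num, counter) is THE answer: counter is the max frequency, num the least element attaining it
def Good (lst : List Int) (p : Int × Int) : Prop :=
  p.1 ∈ lst ∧ p.2 = (lst.count p.1 : Int) ∧
  ∀ x ∈ lst, (lst.count x : Int) ≤ p.2 ∧ ((lst.count x : Int) = p.2 → p.1 ≤ x)

theorem Good_unique {lst : List Int} {p q : Int × Int} (hp : Good lst p) (hq : Good lst q) :
    p = q := by
  obtain ⟨hp1, hp2, hp3⟩ := hp
  obtain ⟨hq1, hq2, hq3⟩ := hq
  have h1 := hp3 q.1 hq1
  have h2 := hq3 p.1 hp1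
  have hc : p.2 = q.2 := le_antisymm (by omega) (by omega)
  have hn : p.1 = q.1 := le_antisymm (h1.2 (by omega)) (h2.2 (by omega))
  exact Prod.ext hn hc

-- invariant of A's loop over the processed prefix q (f is the fixed count function)
def InvA (f : Int → Int) (q : List Int) (st : Int × Int) : Prop :=
  st.2 ∈ q ∧ st.1 = f st.2 ∧ ∀ x ∈ q, f x ≤ st.1 ∧ (f x = st.1 → st.2 ≤ x)

theorem stepA_inv {f : Int → Int} {q : List Int} {st : Int × Int} (h : InvA f q st) (i : Int) :
    InvA f (q ++ [i]) (stepA f st i) := by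
  obtain ⟨h1, h2, h3⟩ := h
  unfold stepA
  split_ifs with hgt heq
  · refine ⟨by simp, rfl, ?_⟩
    intro x hx
    rcases List.mem_append.1 hx with hx | hx
    · exact ⟨le_of_lt (lt_of_le_of_lt (h3 x hx).1 hgt),
        fun he => by have := (h3 x hx).1; omega⟩
    · simp at hx; subst hx; exact ⟨le_refl _, fun _ => le_refl _⟩
  · refine ⟨?_, ?_, ?_⟩
    · rcases le_total st.2 i with hle | hle
      · rw [min_eq_left hle]; exact List.mem_append_left _ h1
      · rw [min_eq_right hle]; exact List.mem_append_right _ (by simp)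
    · rcases le_total st.2 i with hle | hle
      · simpa [min_eq_left hle] using h2
      · simp [min_eq_right hle, ← heq]
    · intro x hx
      rcases List.mem_append.1 hx with hx | hx
      · exact ⟨(h3 x hx).1, fun he => le_trans (min_le_left _ _) ((h3 x hx).2 he)⟩
      · simp at hx; subst hx; exact ⟨le_of_eq heq, fun _ => min_le_right _ _⟩
  · refine ⟨List.mem_append_left _ h1, h2, ?_⟩
    intro x hx
    rcases List.mem_append.1 hx with hx | hx
    · exact h3 x hx
    · simp at hx; subst hx; exact ⟨by omega, fun he => by omega⟩

theorem foldA_inv {f : Int → Int} :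
    ∀ (rest q : List Int) (st : Int × Int), InvA f q st →
      InvA f (q ++ rest) (rest.foldl (stepA f) st) := by
  intro rest
  induction rest with
  | nil => intro q st h; simpa using h
  | cons i rest ih =>
    intro q st h
    have := ih (q ++ [i]) (stepA f st i) (stepA_inv h i)
    simpa using this

theorem repet_good {lst : List Int} (h : lst ≠ []) : Good lst (repet lst) := by
  obtain ⟨a, t, rfl⟩ := List.exists_cons_of_ne_nil h
  have hfa : (0 : Int) < ((a :: t).count a : Int) := by
    exact_mod_cast List.count_pos_iff.2 (List.mem_cons_self ..)
  have hstep : stepA (fun i => ((a :: t).count i : Int)) (0, a) a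
      = (((a :: t).count a : Int), a) := by
    unfold stepA; simp only [gt_iff_lt]; rw [if_pos hfa]
  have hinv : InvA (fun i => ((a :: t).count i : Int)) [a] (((a :: t).count a : Int), a) :=
    ⟨by simp, rfl, by intro x hx; simp at hx; subst hx; simp⟩
  have hmain := foldA_inv t [a] _ hinv
  unfold repet
  simp only [List.headD_cons, List.foldl_cons, hstep]
  obtain ⟨h1, h2, h3⟩ := hmain
  exact ⟨h1, h2, h3⟩

-- invariant of B's run scan: s = done ++ rem, values in done strictly below values in rem,
-- and (bn, bc) is the best (Good-restricted-to-done) answer so far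
def InvB (s done rem : List Int) (bn bc : Int) : Prop :=
  s = done ++ rem ∧
  (∀ x ∈ done, ∀ y ∈ rem, x < y) ∧
  (done = [] → bc = 0) ∧
  (done ≠ [] → bn ∈ done ∧ bc = (s.count bn : Int) ∧
    ∀ x ∈ done, (s.count x : Int) ≤ bc ∧ ((s.count x : Int) = bc → bn ≤ x))

theorem runScanB_good :
    ∀ (n : ℕ) (rem done : List Int) (bn bc : Int) (s : List Int),
      rem.length ≤ n → rem.Pairwise (· ≤ ·) → InvB s done rem bn bc → done ++ rem ≠ [] →
      Good s (runScanB rem bn bc) := by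
  intro n
  induction n with
  | zero =>
    intro rem done bn bc s hlen _ hinv hne
    have hrem : rem = [] := List.length_eq_zero_iff.1 (Nat.le_zero.1 hlen)
    subst hrem
    obtain ⟨hs, _, _, h4⟩ := hinv
    rw [List.append_nil] at hs hne
    subst hs
    obtain ⟨g1, g2, g3⟩ := h4 hne
    rw [runScanB]
    exact ⟨g1, g2, g3⟩
  | succ n ih =>
    intro rem done bn bc s hlen hsorted hinv hne
    match rem with
    | [] =>
      exact ih [] done bn bc s (by simp) (by simp) hinv hne
    | x :: rest =>
      obtain ⟨hs, hsep, h30, h4⟩ := hinv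
      rw [runScanB]
      have hsplit : rest = rest.takeWhile (fun y => y == x) ++ rest.dropWhile (fun y => y == x) :=
        (List.takeWhile_append_dropWhile).symm
      set run := rest.takeWhile (fun y => y == x) with hrun
      set rest' := rest.dropWhile (fun y => y == x) with hrest'
      set len : Int := 1 + (run.length : Int) with hlendef
      have hrunx : ∀ y ∈ run, y = x := by
        intro y hy; simpa using List.mem_takeWhile_imp hy
      have hrest_le : ∀ y ∈ rest, x ≤ y := fun y hy => List.rel_of_pairwise_cons hsorted hy
      have hrest'_sorted : rest'.Pairwise (· ≤ ·) :=
        ((List.pairwise_cons.1 hsorted).2).sublist (List.dropWhile_sublist _)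
      have hrest'_gt : ∀ y ∈ rest', x < y := by
        intro y hy
        cases hr : rest' with
        | nil => rw [hr] at hy; simp at hy
        | cons z zs =>
          have hz : z ≠ x := by
            have h0 := List.head?_dropWhile_not (fun y => y == x) rest
            rw [← hrest', hr] at h0
            simpa using h0
          have hzx : x < z :=
            lt_of_le_of_ne (hrest_le z (by rw [hsplit, hr]; simp)) (Ne.symm hz)
          rw [hr] at hy
          rcases List.mem_cons.1 hy with rfl | hy
          · exact hzx
          · have : z ≤ y := List.rel_of_pairwise_cons (hr ▸ hrest'_sorted) hy
            omega
      have hcount_done : done.count x = 0 := by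
        rw [List.count_eq_zero]
        intro hx
        exact lt_irrefl x (hsep x hx x (List.mem_cons_self ..))
      have hcount_rest' : rest'.count x = 0 := by
        rw [List.count_eq_zero]
        intro hx
        exact lt_irrefl x (hrest'_gt x hx)
      have hcount_run : run.count x = run.length := by
        rw [List.count_eq_length]
        intro b hb; exact ((hrunx b hb) ▸ rfl)
      have hcount_s : (s.count x : Int) = len := by
        rw [hs, hsplit]
        simp [List.count_append, hcount_done, hcount_rest', hcount_run, hlendef]
        omega
      have hlen_pos : (1 : Int) ≤ len := by
        have : (0 : Int) ≤ (run.length : Int) := Int.natCast_nonneg _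
        omega
      set done' := done ++ (x :: run) with hdone'
      have hs' : s = done' ++ rest' := by rw [hs, hsplit, hdone']; simp
      have hmem_x : ∀ a ∈ done', a ∈ done ∨ a = x := by
        intro a ha
        rw [hdone', List.mem_append, List.mem_cons] at ha
        rcases ha with ha | rfl | ha
        · exact Or.inl ha
        · exact Or.inr rfl
        · exact Or.inr (hrunx a ha)
      have hsep' : ∀ a ∈ done', ∀ y ∈ rest', a < y := by
        intro a ha y hy
        rcases hmem_x a ha with ha | rfl
        · exact hsep a ha y (List.mem_cons_of_mem x (by rw [hsplit]; exact List.mem_append_right run hy))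
        · exact hrest'_gt y hy
      have hlen' : rest'.length ≤ n := by
        have h1 : rest'.length ≤ rest.length := List.length_dropWhile_le _ _
        simp at hlen
        omega
      have hne' : done' ++ rest' ≠ [] := by rw [hdone']; simp
      have hdone'_ne : done' ≠ [] := by rw [hdone']; simp
      split_ifs with hgt
      · -- longer run: best becomes (x, len)
        apply ih rest' done' x len s hlen' hrest'_sorted ?_ hne'
        refine ⟨hs', hsep', fun hh => absurd hh hdone'_ne, fun _ => ?_⟩
        refine ⟨by rw [hdone']; simp, hcount_s.symm, ?_⟩
        intro a ha
        rcases hmem_x a ha with ha' | rfl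
        · have hd : done ≠ [] := by intro hh; rw [hh] at ha'; simp at ha'
          have hle := (((h4 hd).2.2) a ha').1
          exact ⟨by omega, fun he => by omega⟩
        · exact ⟨le_of_eq hcount_s, fun _ => le_refl _⟩
      · -- run not longer: keep (bn, bc); bc ≥ len ≥ 1 forces done ≠ []
        have hd : done ≠ [] := by
          intro hh
          have := h30 hh
          omega
        obtain ⟨g1, g2, g3⟩ := h4 hd
        apply ih rest' done' bn bc s hlen' hrest'_sorted ?_ hne'
        refine ⟨hs', hsep', fun hh => absurd hh hdone'_ne, fun _ => ?_⟩
        refine ⟨by rw [hdone']; exact List.mem_append_left _ g1, g2, ?_⟩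
        intro a ha
        rcases hmem_x a ha with ha' | rfl
        · exact g3 a ha'
        · exact ⟨by omega, fun _ => le_of_lt (hsep bn g1 a (List.mem_cons_self ..))⟩

theorem good_perm {l1 l2 : List Int} {p : Int × Int} (hp : l1.Perm l2) (h : Good l1 p) :
    Good l2 p := by
  obtain ⟨h1, h2, h3⟩ := h
  refine ⟨hp.mem_iff.1 h1, by rw [← hp.count_eq]; exact h2, ?_⟩
  intro x hx
  have := h3 x (hp.mem_iff.2 hx)
  rw [hp.count_eq] at this
  exact this

theorem repet_alt_good {lst : List Int} (h : lst ≠ []) : Good lst (repet_alt lst) := by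
  have hperm : (PySem.List.sorted lst (fun x => x) false).Perm lst := PySem.List.sorted_perm ..
  have hne : PySem.List.sorted lst (fun x => x) false ≠ [] := by
    rw [Ne, PySem.List.sorted_eq_nil_iff]; exact h
  have hsorted : (PySem.List.sorted lst (fun x => x) false).Pairwise (· ≤ ·) := by
    simpa using PySem.List.sorted_pairwise (xs := lst) (key := fun x => x)
  have hinv : InvB (PySem.List.sorted lst (fun x => x) false) []
      (PySem.List.sorted lst (fun x => x) false) (lst.headD 0) 0 :=
    ⟨by simp, by simp, fun _ => rfl, fun hd => absurd rfl hd⟩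
  have hgood := runScanB_good (PySem.List.sorted lst (fun x => x) false).length
    (PySem.List.sorted lst (fun x => x) false) [] (lst.headD 0) 0
    (PySem.List.sorted lst (fun x => x) false) le_rfl hsorted hinv (by simpa using hne)
  exact good_perm hperm hgood

-- ===== VERDICT (by name: the statement is the Claim_ definition above) =====
theorem repet_spec : Claim_equal_repet := by
  intro lst _ hpre
  unfold Spec_repet
  exact Good_unique (repet_good hpre) (repet_alt_good hpre)
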